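-- pv_equiv track=rewrite | github.com/shivang5209/phishing-website-detector | phishing_detector/batch_analysis.py | _resolve_url_column
-- ===== SOURCE A (Python) =====
-- from typing import Dict, List
--
-- URL_COLUMN_CANDIDATES = ("url", "URL", "Url", "link", "Link", "domain", "Domain", "website", "Website", "uri", "URI")
--
-- def _resolve_url_column(fieldnames: List[str]) -> str:
--     normalized = {name.strip().lower(): name for name in fieldnames}
--     for candidate in URL_COLUMN_CANDIDATES:
--         match = normalized.get(candidate.lower())
--         if match is not None:
--             return match
--     raise ValueError(
--         "Could not find a URL column in the uploaded CSV. Supported columns include: "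
--         + ", ".join(URL_COLUMN_CANDIDATES)
--     )
-- ===== SOURCE B (Python) =====
-- _RANK = {"url": 0, "link": 1, "domain": 2, "website": 3, "uri": 4}
--
-- def _resolve_url_column(fieldnames):
--     best_rank = 5
--     best_name = None
--     for name in fieldnames:
--         rank = _RANK.get(name.strip().lower(), 5)
--         if rank <= best_rank and rank < 5:
--             best_rank = rank
--             best_name = name
--     if best_name is None:
--         raise ValueError(
--             "Could not find a URL column in the uploaded CSV. Supported columns include: "
--             "url, URL, Url, link, Link, domain, Domain, website, Website, uri, URI"
--         )
--     return best_name
-- ===== Notes on version B (the rewrite author's own statement) =====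
-- stated objective: alternative
-- what changed: Replaces A's normalized-name dict plus candidate cascade with a single pass over fieldnames that tracks the lowest-rank (highest-priority) matching name, taking the last name on rank ties to reproduce dict last-wins.
import Mathlib
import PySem

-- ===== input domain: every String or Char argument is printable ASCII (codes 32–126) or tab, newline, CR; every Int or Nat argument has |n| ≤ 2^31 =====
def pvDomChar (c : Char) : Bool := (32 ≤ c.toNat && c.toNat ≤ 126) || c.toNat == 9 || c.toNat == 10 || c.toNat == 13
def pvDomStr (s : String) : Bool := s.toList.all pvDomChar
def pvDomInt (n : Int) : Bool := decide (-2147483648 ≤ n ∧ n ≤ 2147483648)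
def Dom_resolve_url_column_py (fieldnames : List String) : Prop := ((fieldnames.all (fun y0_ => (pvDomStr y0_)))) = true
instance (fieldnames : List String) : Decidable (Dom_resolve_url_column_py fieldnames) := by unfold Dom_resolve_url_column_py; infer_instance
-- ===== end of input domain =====

-- B replaces A's normalized dict + candidate cascade by a single pass over fieldnames tracking the
-- lowest-rank matching name (last name wins on rank ties, matching dict last-wins); objective: alternative.

-- ===== PORT A =====
-- candidate loop of A (in Python: `for candidate in URL_COLUMN_CANDIDATES: ...`);
-- the [] case is Python's `raise ValueError(...)`, excluded by Pre_.
def pvGoA (cands : List String) (normalized : PySem.Dict String String) : String :=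
  match cands with
  | [] => ""
  | c :: cs =>
    match normalized.get? (PySem.Str.lower c) with
    | some m => m
    | none => pvGoA cs normalized

def resolve_url_column_py (fieldnames : List String) : String :=
  let normalized := fieldnames.foldl
    (fun d name => d.insert (PySem.Str.lower (PySem.Str.strip name)) name) PySem.Dict.empty
  pvGoA ["url", "URL", "Url", "link", "Link", "domain", "Domain", "website", "Website", "uri", "URI"] normalized

-- ===== PORT B =====
-- _RANK.get(s, 5): the literal rank table of Source B (a fixed 5-entry dict, ported as an if-chain; exact)
def pvRank (s : String) : Nat :=
  if s = "url" then 0 else if s = "link" then 1 else if s = "domain" then 2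
  else if s = "website" then 3 else if s = "uri" then 4 else 5

-- loop body of B: keep the new name when its rank is ≤ the best so far and is a real candidate
def pvStepB (acc : Nat × Option String) (name : String) : Nat × Option String :=
  let r := pvRank (PySem.Str.lower (PySem.Str.strip name))
  if r ≤ acc.1 ∧ r < 5 then (r, some name) else acc

-- the `best_name is None` case is Python's `raise ValueError(...)`, excluded by Pre_.
def resolve_url_column_py_alt (fieldnames : List String) : String :=
  match (fieldnames.foldl pvStepB (5, none)).2 with
  | some n => n
  | none => ""

-- ===== PRECONDITION & SPEC =====
-- Pre_ excludes exactly the inputs with no recognised URL column, where both Pythons raise ValueError.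
def Pre_resolve_url_column_py (fieldnames : List String) : Prop :=
  ∃ name ∈ fieldnames,
    PySem.Str.lower (PySem.Str.strip name) ∈ (["url", "link", "domain", "website", "uri"] : List String)
instance (fieldnames : List String) : Decidable (Pre_resolve_url_column_py fieldnames) := by
  unfold Pre_resolve_url_column_py; infer_instance
def pvWitness_resolve_url_column_py : List String := [" URL ", "extra"]

def Spec_resolve_url_column_py (fieldnames : List String) (out : String) : Prop := out = resolve_url_column_py_alt fieldnames
instance (fieldnames : List String) (out : String) : Decidable (Spec_resolve_url_column_py fieldnames out) := by unfold Spec_resolve_url_column_py; infer_instance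

-- ===== CLAIM (what is proved, stated in full; the proofs are below) =====
def Claim_equal_resolve_url_column_py : Prop := ∀ (fieldnames : List String), Dom_resolve_url_column_py fieldnames → Pre_resolve_url_column_py fieldnames → Spec_resolve_url_column_py fieldnames (resolve_url_column_py fieldnames)

-- ===== LEMMAS AND PROOFS =====

-- five-slot state: the last fieldname normalizing to url/link/domain/website/uri, respectively
def pvStepT (t : Option String × Option String × Option String × Option String × Option String)
    (name : String) : Option String × Option String × Option String × Option String × Option String :=
  let s := PySem.Str.lower (PySem.Str.strip name)
  (if s = "url" then some name else t.1,
   if s = "link" then some name else t.2.1,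
   if s = "domain" then some name else t.2.2.1,
   if s = "website" then some name else t.2.2.2.1,
   if s = "uri" then some name else t.2.2.2.2)

-- B's pair state is the first filled slot (with its rank)
def pvPick (t : Option String × Option String × Option String × Option String × Option String) :
    Nat × Option String :=
  match t with
  | (some n, _, _, _, _) => (0, some n)
  | (none, some n, _, _, _) => (1, some n)
  | (none, none, some n, _, _) => (2, some n)
  | (none, none, none, some n, _) => (3, some n)
  | (none, none, none, none, some n) => (4, some n)
  | (none, none, none, none, none) => (5, none)

theorem pv_pick_step (t : Option String × Option String × Option String × Option String × Option String)
    (name : String) : pvStepB (pvPick t) name = pvPick (pvStepT t name) := by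
  obtain ⟨a, b, c, d, e⟩ := t
  simp only [pvStepB, pvStepT, pvRank]
  by_cases h1 : PySem.Str.lower (PySem.Str.strip name) = "url"
  · simp only [h1, reduceIte]
    cases a <;> cases b <;> cases c <;> cases d <;> cases e <;> simp [pvPick]
  · simp only [if_neg h1]
    by_cases h2 : PySem.Str.lower (PySem.Str.strip name) = "link"
    · simp only [h2, reduceIte]
      cases a <;> cases b <;> cases c <;> cases d <;> cases e <;> simp [pvPick]
    · simp only [if_neg h2]
      by_cases h3 : PySem.Str.lower (PySem.Str.strip name) = "domain"
      · simp only [h3, reduceIte]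
        cases a <;> cases b <;> cases c <;> cases d <;> cases e <;> simp [pvPick]
      · simp only [if_neg h3]
        by_cases h4 : PySem.Str.lower (PySem.Str.strip name) = "website"
        · simp only [h4, reduceIte]
          cases a <;> cases b <;> cases c <;> cases d <;> cases e <;> simp [pvPick]
        · simp only [if_neg h4]
          by_cases h5 : PySem.Str.lower (PySem.Str.strip name) = "uri"
          · simp only [h5, reduceIte]
            cases a <;> cases b <;> cases c <;> cases d <;> cases e <;> simp [pvPick]
          · simp only [if_neg h5]
            cases a <;> cases b <;> cases c <;> cases d <;> cases e <;> simp [pvPick]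

theorem pv_fold_pick (xs : List String)
    (t : Option String × Option String × Option String × Option String × Option String) :
    xs.foldl pvStepB (pvPick t) = pvPick (xs.foldl pvStepT t) := by
  induction xs generalizing t with
  | nil => rfl
  | cons x l ih => rw [List.foldl_cons, pv_pick_step, ih, List.foldl_cons]

-- last fieldname normalizing to k, as a fold (A's dict comprehension seen per key)
def pvLastMatch (fieldnames : List String) (k : String) : Option String :=
  fieldnames.foldl
    (fun found name =>
      if PySem.Str.lower (PySem.Str.strip name) = k then some name else found) none

-- the dict built by A's comprehension looks up k as the last fieldname normalizing to k
theorem pv_get_build (fieldnames : List String) (d : PySem.Dict String String) (k : String) :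
    (fieldnames.foldl (fun d name => d.insert (PySem.Str.lower (PySem.Str.strip name)) name) d).get? k
      = fieldnames.foldl
          (fun found name =>
            if PySem.Str.lower (PySem.Str.strip name) = k then some name else found) (d.get? k) := by
  induction fieldnames generalizing d with
  | nil => rfl
  | cons a l ih =>
    rw [List.foldl_cons, List.foldl_cons, ih, PySem.Dict.get?_insert]
    by_cases h : PySem.Str.lower (PySem.Str.strip a) = k
    · rw [if_pos h, if_pos h.symm]
    · rw [if_neg h, if_neg (fun hk => h hk.symm)]

theorem pv_get_eq_lastMatch (fieldnames : List String) (k : String) :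
    (fieldnames.foldl (fun d name => d.insert (PySem.Str.lower (PySem.Str.strip name)) name)
        PySem.Dict.empty).get? k = pvLastMatch fieldnames k := by
  rw [pv_get_build]; rfl

-- the five-slot fold computes exactly the five per-candidate last matches
theorem pv_foldT_components (xs : List String)
    (t : Option String × Option String × Option String × Option String × Option String) :
    xs.foldl pvStepT t =
      (xs.foldl (fun o name => if PySem.Str.lower (PySem.Str.strip name) = "url" then some name else o) t.1,
       xs.foldl (fun o name => if PySem.Str.lower (PySem.Str.strip name) = "link" then some name else o) t.2.1,
       xs.foldl (fun o name => if PySem.Str.lower (PySem.Str.strip name) = "domain" then some name else o) t.2.2.1,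
       xs.foldl (fun o name => if PySem.Str.lower (PySem.Str.strip name) = "website" then some name else o) t.2.2.2.1,
       xs.foldl (fun o name => if PySem.Str.lower (PySem.Str.strip name) = "uri" then some name else o) t.2.2.2.2) := by
  induction xs generalizing t with
  | nil => rfl
  | cons x l ih => rw [List.foldl_cons, ih]; simp [pvStepT]

-- ===== VERDICT (by name: the statement is the Claim_ definition above) =====
theorem resolve_url_column_py_spec : Claim_equal_resolve_url_column_py := by
  intro fieldnames _ _
  unfold Spec_resolve_url_column_py resolve_url_column_py resolve_url_column_py_alt
  have hfold : fieldnames.foldl pvStepB (5, none)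
      = pvPick (fieldnames.foldl pvStepT (none, none, none, none, none)) :=
    pv_fold_pick fieldnames (none, none, none, none, none)
  simp only [pvGoA, pv_get_eq_lastMatch, hfold, pv_foldT_components]
  have l1 : PySem.Str.lower "url" = "url" := by decide
  have l2 : PySem.Str.lower "URL" = "url" := by decide
  have l3 : PySem.Str.lower "Url" = "url" := by decide
  have l4 : PySem.Str.lower "link" = "link" := by decide
  have l5 : PySem.Str.lower "Link" = "link" := by decide
  have l6 : PySem.Str.lower "domain" = "domain" := by decide
  have l7 : PySem.Str.lower "Domain" = "domain" := by decide
  have l8 : PySem.Str.lower "website" = "website" := by decide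
  have l9 : PySem.Str.lower "Website" = "website" := by decide
  have l10 : PySem.Str.lower "uri" = "uri" := by decide
  have l11 : PySem.Str.lower "URI" = "uri" := by decide
  rw [l1, l2, l3, l4, l5, l6, l7, l8, l9, l10, l11]
  simp only [pvLastMatch]
  cases fieldnames.foldl (fun o name => if PySem.Str.lower (PySem.Str.strip name) = "url" then some name else o) none <;>
  cases fieldnames.foldl (fun o name => if PySem.Str.lower (PySem.Str.strip name) = "link" then some name else o) none <;>
  cases fieldnames.foldl (fun o name => if PySem.Str.lower (PySem.Str.strip name) = "domain" then some name else o) none <;>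
  cases fieldnames.foldl (fun o name => if PySem.Str.lower (PySem.Str.strip name) = "website" then some name else o) none <;>
  cases fieldnames.foldl (fun o name => if PySem.Str.lower (PySem.Str.strip name) = "uri" then some name else o) none <;> rfl
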